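-- pv_equiv track=rewrite | github.com/Kvkthecreator/rightnow-agent-app-fullstack | api/src/app/agents/pipeline/reflection_agent_canon_v2.py | _identify_critical_gaps
-- ===== SOURCE A (Python) =====
-- def _identify_critical_gaps(content: str) -> str:
--     """Identify what's missing that could unlock new insights"""
--
--     # Implementation gap
--     if "idea" in content or "concept" in content:
--         if not any(word in content for word in ["test", "experiment", "pilot", "prototype", "try"]):
--             return "Gap identified: Rich ideas without experimentation plans. Even the best concepts need reality contact - what's the smallest test that could validate or invalidate your thinking?"
--
--     # Stakeholder gap
--     if any(word in content for word in ["project", "initiative", "product", "solution"]):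
--         if not any(word in content for word in ["user", "customer", "stakeholder", "audience"]):
--             return "Missing perspective: No explicit user/stakeholder consideration detected. The best solutions deeply understand who they serve - whose problem are you really solving?"
--
--     # Metrics gap
--     if any(word in content for word in ["goal", "objective", "success", "achieve"]):
--         if not any(word in content for word in ["measure", "metric", "kpi", "indicator", "track"]):
--             return "Insight gap: Goals without metrics often drift. What specific, observable changes would indicate you're succeeding? Defining measures sharpens thinking and accelerates learning."
--
--     # Systems gap
--     if content.count("problem") > 2 or content.count("issue") > 2:
--         if not any(word in content for word in ["system", "cause", "root", "underlying", "pattern"]):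
--             return "Depth opportunity: Multiple problems might share systemic roots. Stepping back to see the system often reveals elegant interventions that address multiple issues simultaneously."
--
--     return ""
-- ===== SOURCE B (Python) =====
-- _WORDS = [
--     "idea", "concept", "test", "experiment", "pilot", "prototype", "try",
--     "project", "initiative", "product", "solution",
--     "user", "customer", "stakeholder", "audience",
--     "goal", "objective", "success", "achieve",
--     "measure", "metric", "kpi", "indicator", "track",
--     "problem", "issue",
--     "system", "cause", "root", "underlying", "pattern",
-- ]
--
-- _MSG1 = "Gap identified: Rich ideas without experimentation plans. Even the best concepts need reality contact - what's the smallest test that could validate or invalidate your thinking?"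
-- _MSG2 = "Missing perspective: No explicit user/stakeholder consideration detected. The best solutions deeply understand who they serve - whose problem are you really solving?"
-- _MSG3 = "Insight gap: Goals without metrics often drift. What specific, observable changes would indicate you're succeeding? Defining measures sharpens thinking and accelerates learning."
-- _MSG4 = "Depth opportunity: Multiple problems might share systemic roots. Stepping back to see the system often reveals elegant interventions that address multiple issues simultaneously."
--
--
-- def _identify_critical_gaps(content: str) -> str:
--     """Identify what's missing that could unlock new insights"""
--     # One pass over the text: record every vocabulary-word occurrence by its
--     # start position, then decide purely on the resulting occurrence list.
--     # ("problem"/"issue" cannot overlap themselves, so the number of start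
--     # positions equals str.count for them.)
--     hits = [w for i in range(len(content)) for w in _WORDS
--             if content.startswith(w, i)]
--
--     if ("idea" in hits or "concept" in hits) and not any(
--             w in hits for w in ["test", "experiment", "pilot", "prototype", "try"]):
--         return _MSG1
--     if any(w in hits for w in ["project", "initiative", "product", "solution"]) and not any(
--             w in hits for w in ["user", "customer", "stakeholder", "audience"]):
--         return _MSG2
--     if any(w in hits for w in ["goal", "objective", "success", "achieve"]) and not any(
--             w in hits for w in ["measure", "metric", "kpi", "indicator", "track"]):
--         return _MSG3
--     if (hits.count("problem") > 2 or hits.count("issue") > 2) and not any(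
--             w in hits for w in ["system", "cause", "root", "underlying", "pattern"]):
--         return _MSG4
--     return ""
-- ===== Notes on version B (the rewrite author's own statement) =====
-- stated objective: alternative
-- what changed: Instead of A's ~20 separate membership/count scans of the text (one per keyword), B makes a single left-to-right pass over the text that collects every vocabulary-word occurrence by start position into one hits list, then decides the four gap rules by pure membership and counting on that list; the two count-based keywords have no self-overlap, so their number of start positions equals str.count.
import Mathlib
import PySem

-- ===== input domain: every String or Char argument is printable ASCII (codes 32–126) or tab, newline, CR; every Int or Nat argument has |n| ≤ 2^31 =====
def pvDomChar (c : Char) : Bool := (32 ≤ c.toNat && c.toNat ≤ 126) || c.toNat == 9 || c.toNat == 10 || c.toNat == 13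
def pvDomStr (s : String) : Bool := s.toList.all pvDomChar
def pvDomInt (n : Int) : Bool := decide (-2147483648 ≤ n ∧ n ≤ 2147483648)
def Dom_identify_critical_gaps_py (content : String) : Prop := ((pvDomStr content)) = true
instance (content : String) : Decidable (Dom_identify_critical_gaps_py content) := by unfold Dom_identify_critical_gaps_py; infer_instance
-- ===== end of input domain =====

-- B replaces A's 18 separate substring scans and 2 .count scans with ONE left-to-right pass
-- over the text that collects every vocabulary-word occurrence (by start position) into a
-- list, followed by pure list logic; objective: alternative (different algorithm, same result).

def pvMsg1 : String := "Gap identified: Rich ideas without experimentation plans. Even the best concepts need reality contact - what's the smallest test that could validate or invalidate your thinking?"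
def pvMsg2 : String := "Missing perspective: No explicit user/stakeholder consideration detected. The best solutions deeply understand who they serve - whose problem are you really solving?"
def pvMsg3 : String := "Insight gap: Goals without metrics often drift. What specific, observable changes would indicate you're succeeding? Defining measures sharpens thinking and accelerates learning."
def pvMsg4 : String := "Depth opportunity: Multiple problems might share systemic roots. Stepping back to see the system often reveals elegant interventions that address multiple issues simultaneously."

-- ===== PORT A =====
-- A's early returns become a chain of helpers, one per if-block, in the original order.
def pvA_gap4 (content : String) : String :=
  if decide (2 < PySem.Str.count content "problem") || decide (2 < PySem.Str.count content "issue") then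
    if !(["system", "cause", "root", "underlying", "pattern"].any (fun w => PySem.Str.isIn w content)) then
      pvMsg4
    else ""
  else ""

def pvA_gap3 (content : String) : String :=
  if ["goal", "objective", "success", "achieve"].any (fun w => PySem.Str.isIn w content) then
    if !(["measure", "metric", "kpi", "indicator", "track"].any (fun w => PySem.Str.isIn w content)) then
      pvMsg3
    else pvA_gap4 content
  else pvA_gap4 content

def pvA_gap2 (content : String) : String :=
  if ["project", "initiative", "product", "solution"].any (fun w => PySem.Str.isIn w content) then
    if !(["user", "customer", "stakeholder", "audience"].any (fun w => PySem.Str.isIn w content)) then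
      pvMsg2
    else pvA_gap3 content
  else pvA_gap3 content

def identify_critical_gaps_py (content : String) : String :=
  if PySem.Str.isIn "idea" content || PySem.Str.isIn "concept" content then
    if !(["test", "experiment", "pilot", "prototype", "try"].any (fun w => PySem.Str.isIn w content)) then
      pvMsg1
    else pvA_gap2 content
  else pvA_gap2 content

-- ===== PORT B =====
-- Source B's module-level vocabulary _WORDS.
def pvWords : List String :=
  ["idea", "concept", "test", "experiment", "pilot", "prototype", "try",
   "project", "initiative", "product", "solution",
   "user", "customer", "stakeholder", "audience",
   "goal", "objective", "success", "achieve",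
   "measure", "metric", "kpi", "indicator", "track",
   "problem", "issue",
   "system", "cause", "root", "underlying", "pattern"]

-- Source B's local 'hits': one pass i = 0 .. len(content)-1 (range(len(content)), indices are ≥ 0
-- so List.range is exact); content.startswith(w, i) with 0 ≤ i is exactly
-- PySem.Chars.startswith (content[i:]) w.
def pvHits (cs : List Char) : List String :=
  (List.range cs.length).flatMap
    (fun i => pvWords.filter (fun w => PySem.Chars.startswith (cs.drop i) w.toList))

def identify_critical_gaps_py_alt (content : String) : String :=
  let hits := pvHits content.toList
  if (hits.contains "idea" || hits.contains "concept") &&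
     !(["test", "experiment", "pilot", "prototype", "try"].any (fun w => hits.contains w)) then
    pvMsg1
  else if (["project", "initiative", "product", "solution"].any (fun w => hits.contains w)) &&
     !(["user", "customer", "stakeholder", "audience"].any (fun w => hits.contains w)) then
    pvMsg2
  else if (["goal", "objective", "success", "achieve"].any (fun w => hits.contains w)) &&
     !(["measure", "metric", "kpi", "indicator", "track"].any (fun w => hits.contains w)) then
    pvMsg3
  else if (decide (2 < PySem.List.count hits "problem") || decide (2 < PySem.List.count hits "issue")) &&
     !(["system", "cause", "root", "underlying", "pattern"].any (fun w => hits.contains w)) then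
    pvMsg4
  else ""

-- ===== PRECONDITION & SPEC =====
def Spec_identify_critical_gaps_py (content : String) (out : String) : Prop := out = identify_critical_gaps_py_alt content
instance (content : String) (out : String) : Decidable (Spec_identify_critical_gaps_py content out) := by unfold Spec_identify_critical_gaps_py; infer_instance

-- ===== CLAIM =====
def Claim_equal_identify_critical_gaps_py : Prop := ∀ (content : String), Dom_identify_critical_gaps_py content → Spec_identify_critical_gaps_py content (identify_critical_gaps_py content)

-- ===== LEMMAS AND PROOFS =====

-- A's 'if trigger then (if no absence then msg else rest) else rest' = one combined test.
theorem pv_step (t a : Bool) (m r : String) :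
    (if t then (if !a then m else r) else r) = (if t && !a then m else r) := by
  cases t <;> cases a <;> simp

def pvQ1 (c : String) : Bool := (PySem.Str.isIn "idea" c || PySem.Str.isIn "concept" c) && !(["test", "experiment", "pilot", "prototype", "try"].any (fun w => PySem.Str.isIn w c))
def pvQ2 (c : String) : Bool := (["project", "initiative", "product", "solution"].any (fun w => PySem.Str.isIn w c)) && !(["user", "customer", "stakeholder", "audience"].any (fun w => PySem.Str.isIn w c))
def pvQ3 (c : String) : Bool := (["goal", "objective", "success", "achieve"].any (fun w => PySem.Str.isIn w c)) && !(["measure", "metric", "kpi", "indicator", "track"].any (fun w => PySem.Str.isIn w c))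
def pvQ4 (c : String) : Bool := (decide (2 < PySem.Str.count c "problem") || decide (2 < PySem.Str.count c "issue")) && !(["system", "cause", "root", "underlying", "pattern"].any (fun w => PySem.Str.isIn w c))

theorem pv_g4 (c : String) : pvA_gap4 c = if pvQ4 c then pvMsg4 else "" := by
  unfold pvA_gap4 pvQ4; rw [pv_step]

theorem pv_g3 (c : String) : pvA_gap3 c = if pvQ3 c then pvMsg3 else pvA_gap4 c := by
  unfold pvA_gap3 pvQ3; rw [pv_step]

theorem pv_g2 (c : String) : pvA_gap2 c = if pvQ2 c then pvMsg2 else pvA_gap3 c := by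
  unfold pvA_gap2 pvQ2; rw [pv_step]

theorem pv_aEq (c : String) : identify_critical_gaps_py c =
    if pvQ1 c then pvMsg1 else if pvQ2 c then pvMsg2 else if pvQ3 c then pvMsg3 else
      if pvQ4 c then pvMsg4 else "" := by
  unfold identify_critical_gaps_py pvQ1
  rw [pv_step, pv_g2, pv_g3, pv_g4]

-- ---- characterising pvHits: recursion on the text ----

def pvHitsRec (cs : List Char) : List String :=
  match cs with
  | [] => []
  | c :: t => pvWords.filter (fun w => w.toList.isPrefixOf (c :: t)) ++ pvHitsRec t

theorem pv_hits_eq (cs : List Char) : pvHits cs = pvHitsRec cs := by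
  induction cs with
  | nil => rfl
  | cons c t ih =>
      unfold pvHits pvHitsRec
      rw [List.length_cons, List.range_succ_eq_map, List.flatMap_cons, List.flatMap_map]
      simp only [List.drop_zero, List.drop_succ_cons]
      rw [← pvHits]
      rw [ih]
      rfl

-- occurrence count of sub by start position
def pvOcc (sub : List Char) : List Char → Nat
  | [] => 0
  | c :: t => (if sub.isPrefixOf (c :: t) then 1 else 0) + pvOcc sub t

-- membership in pvHitsRec = the word occurs somewhere (for a nonempty word)
theorem pv_mem (cs : List Char) (w : String) (hne : w.toList ≠ []) :
    (w ∈ pvHitsRec cs ↔ w ∈ pvWords ∧ ∃ j, w.toList <+: cs.drop j) := by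
  induction cs with
  | nil =>
      simp only [pvHitsRec, List.not_mem_nil, false_iff, not_and]
      intro _ ⟨j, hj⟩
      simp only [List.drop_nil, List.prefix_nil] at hj
      exact hne hj
  | cons c t ih =>
      simp only [pvHitsRec, List.mem_append, List.mem_filter, ih]
      constructor
      · rintro (⟨hw, hp⟩ | ⟨hw, j, hj⟩)
        · exact ⟨hw, 0, List.isPrefixOf_iff_prefix.mp hp⟩
        · exact ⟨hw, j + 1, by simpa [List.drop_succ_cons] using hj⟩
      · rintro ⟨hw, j, hj⟩
        cases j with
        | zero => exact Or.inl ⟨hw, List.isPrefixOf_iff_prefix.mpr (by simpa using hj)⟩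
        | succ i => exact Or.inr ⟨hw, i, by simpa [List.drop_succ_cons] using hj⟩

theorem pv_contains (cs : List Char) (w : String) (hw : w ∈ pvWords) (hne : w.toList ≠ []) :
    (pvHits cs).contains w = PySem.Chars.isIn w.toList cs := by
  rw [pv_hits_eq, Bool.eq_iff_iff, List.contains_iff_mem, pv_mem cs w hne,
    ← PySem.Chars.exists_prefix_drop_iff_isIn]
  constructor
  · rintro ⟨_, j, hj⟩; exact ⟨j, hj⟩
  · rintro ⟨j, hj⟩; exact ⟨hw, j, hj⟩

theorem pv_count_hits (cs : List Char) (w : String) (hw : List.count w pvWords = 1) :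
    List.count w (pvHitsRec cs) = pvOcc w.toList cs := by
  induction cs with
  | nil => simp [pvHitsRec, pvOcc]
  | cons c t ih =>
      simp only [pvHitsRec, List.count_append, ih, pvOcc]
      congr 1
      by_cases hp : w.toList.isPrefixOf (c :: t)
      · have hcf := List.count_filter (p := fun w : String => w.toList.isPrefixOf (c :: t))
          (a := w) (l := pvWords) hp
        rw [if_pos hp, hcf, hw]
      · rw [if_neg hp, List.count_eq_zero]
        intro hmem
        exact hp (List.mem_filter.mp hmem).2

-- ---- pvOcc = PySem.Chars.count for words with no self-overlap ----

def pvNoBorder (sub : List Char) : Prop :=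
  sub ≠ [] ∧ ∀ j, j < sub.length → j = 0 ∨ ¬ (sub.drop j <+: sub)

-- no occurrence can start strictly inside another
theorem pv_mid (sub cs : List Char) (hnb : pvNoBorder sub) (hpre : sub <+: cs)
    (j : Nat) (hj0 : 0 < j) (hj : j < sub.length) : ¬ sub <+: cs.drop j := by
  intro habs
  obtain ⟨r, hr⟩ := hpre
  have hdj : cs.drop j = sub.drop j ++ r := by
    rw [← hr, List.drop_append_of_le_length (le_of_lt hj)]
  have h1 : sub.drop j <+: cs.drop j := ⟨r, hdj.symm⟩
  have h2 : sub.drop j <+: sub :=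
    List.prefix_of_prefix_length_le h1 habs (by simp)
  rcases hnb.2 j hj with h | h
  · omega
  · exact h h2

theorem pv_occ_step (sub cs : List Char) (j : Nat)
    (h : ¬ sub.isPrefixOf (cs.drop j)) :
    pvOcc sub (cs.drop j) = pvOcc sub (cs.drop (j + 1)) := by
  by_cases hj : j < cs.length
  · rw [List.drop_eq_getElem_cons hj] at h ⊢
    simp only [pvOcc, if_neg h]
    omega
  · have h1 : cs.drop j = [] := List.drop_eq_nil_of_le (by omega)
    have h2 : cs.drop (j + 1) = [] := List.drop_eq_nil_of_le (by omega)
    rw [h1, h2]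

theorem pv_occ_chain (sub cs : List Char) :
    ∀ (d j : Nat), (∀ m, j ≤ m → m < j + d → ¬ sub.isPrefixOf (cs.drop m)) →
      pvOcc sub (cs.drop j) = pvOcc sub (cs.drop (j + d)) := by
  intro d
  induction d with
  | zero => intro j _; rfl
  | succ e ih =>
      intro j hm
      rw [pv_occ_step sub cs j (hm j le_rfl (by omega))]
      have harr : j + (e + 1) = (j + 1) + e := by omega
      rw [harr]
      exact ih (j + 1) (fun m h1 h2 => hm m (by omega) (by omega))

theorem pv_occ_prefix (sub cs : List Char) (hnb : pvNoBorder sub)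
    (h : sub.isPrefixOf cs) : pvOcc sub cs = 1 + pvOcc sub (cs.drop sub.length) := by
  have hpre : sub <+: cs := List.isPrefixOf_iff_prefix.mp h
  have hlen : sub.length ≤ cs.length := hpre.length_le
  have hsub0 : 0 < sub.length := by
    cases hs : sub with
    | nil => exact absurd hs hnb.1
    | cons a b => simp
  rcases cs with _ | ⟨c, t⟩
  · exfalso
    simp only [List.length_nil, Nat.le_zero] at hlen
    exact hnb.1 (List.length_eq_zero_iff.mp hlen)
  · simp only [pvOcc, if_pos h]
    have hchain := pv_occ_chain sub (c :: t) (sub.length - 1) 1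
      (fun m h1 h2 => by
        intro habs
        exact pv_mid sub (c :: t) hnb hpre m (by omega) (by omega)
          (List.isPrefixOf_iff_prefix.mp habs))
    have harr : 1 + (sub.length - 1) = sub.length := by omega
    rw [harr] at hchain
    simp only [List.drop_succ_cons, List.drop_zero] at hchain
    rw [hchain]

theorem pv_go (sub : List Char) (hnb : pvNoBorder sub) :
    ∀ (fuel : Nat) (cs : List Char) (acc : Nat), cs.length ≤ fuel →
      PySem.Chars.count.go sub fuel cs acc = acc + pvOcc sub cs := by
  intro fuel
  induction fuel with
  | zero =>
      intro cs acc h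
      have : cs = [] := List.length_eq_zero_iff.mp (by omega)
      subst this
      rw [PySem.Chars.count.go.eq_def]
      rfl
  | succ f ih =>
      intro cs acc h
      cases cs with
      | nil => rw [PySem.Chars.count.go.eq_def]; rfl
      | cons c t =>
          rw [PySem.Chars.count.go.eq_def]
          simp only []
          by_cases hp : sub.isPrefixOf (c :: t)
          · rw [if_pos hp]
            have hpre : sub <+: (c :: t) := List.isPrefixOf_iff_prefix.mp hp
            have hlen : sub.length ≤ (c :: t).length := hpre.length_le
            have hsub0 : 0 < sub.length := by
              cases hs : sub with
              | nil => exact absurd hs hnb.1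
              | cons a b => simp
            rw [ih _ _ (by simp at h ⊢; omega)]
            rw [pv_occ_prefix sub (c :: t) hnb hp]
            omega
          · rw [if_neg hp]
            rw [ih _ _ (by simp at h; omega)]
            simp only [pvOcc, if_neg hp]
            omega

theorem pv_count_eq (sub cs : List Char) (hnb : pvNoBorder sub) :
    PySem.Chars.count cs sub = pvOcc sub cs := by
  have hne : sub.isEmpty = false := by
    cases hs : sub with
    | nil => exact absurd hs hnb.1
    | cons a b => rfl
  unfold PySem.Chars.count
  rw [hne]
  simp only [Bool.false_eq_true, if_false]
  rw [pv_go sub hnb cs.length cs 0 le_rfl]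
  omega

-- any over a literal word list: hits-membership = substring test, word by word
theorem pv_any_congr {α : Type} (l : List α) (p q : α → Bool)
    (h : ∀ a ∈ l, p a = q a) : l.any p = l.any q := by
  induction l with
  | nil => rfl
  | cons a t ih =>
      simp only [List.any_cons, h a List.mem_cons_self,
        ih (fun b hb => h b (List.mem_cons_of_mem a hb))]

theorem pv_bEq (c : String) : identify_critical_gaps_py_alt c =
    if pvQ1 c then pvMsg1 else if pvQ2 c then pvMsg2 else if pvQ3 c then pvMsg3 else
      if pvQ4 c then pvMsg4 else "" := by
  unfold identify_critical_gaps_py_alt pvQ1 pvQ2 pvQ3 pvQ4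
  have hcnt : ∀ (w : String), List.count w pvWords = 1 → pvNoBorder w.toList →
      PySem.List.count (pvHits c.toList) w = PySem.Chars.count c.toList w.toList := by
    intro w h1 h2
    rw [PySem.List.count_eq, pv_hits_eq, pv_count_hits _ _ h1, pv_count_eq _ _ h2]
  have hc : ∀ (w : String), w ∈ pvWords → w.toList ≠ [] →
      (pvHits c.toList).contains w = PySem.Str.isIn w c := by
    intro w hw hne
    rw [PySem.Str.isIn_eq, pv_contains c.toList w hw hne]
  have hany : ∀ (ws : List String), (∀ a ∈ ws, a ∈ pvWords ∧ a.toList ≠ []) →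
      (ws.any (fun w => (pvHits c.toList).contains w)) = (ws.any (fun w => PySem.Str.isIn w c)) := by
    intro ws hws
    exact pv_any_congr ws _ _ (fun a ha => hc a (hws a ha).1 (hws a ha).2)
  have hnb1 : pvNoBorder "problem".toList := by
    unfold pvNoBorder; exact ⟨by decide, by decide⟩
  have hnb2 : pvNoBorder "issue".toList := by
    unfold pvNoBorder; exact ⟨by decide, by decide⟩
  simp only [PySem.Str.count_eq]
  rw [hcnt "problem" (by decide) hnb1, hcnt "issue" (by decide) hnb2,
      hc "idea" (by decide) (by decide), hc "concept" (by decide) (by decide),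
      hany ["test", "experiment", "pilot", "prototype", "try"] (by decide),
      hany ["project", "initiative", "product", "solution"] (by decide),
      hany ["user", "customer", "stakeholder", "audience"] (by decide),
      hany ["goal", "objective", "success", "achieve"] (by decide),
      hany ["measure", "metric", "kpi", "indicator", "track"] (by decide),
      hany ["system", "cause", "root", "underlying", "pattern"] (by decide)]
  rfl


-- ===== VERDICT =====
theorem identify_critical_gaps_py_spec : Claim_equal_identify_critical_gaps_py := by
  intro content _
  unfold Spec_identify_critical_gaps_py
  rw [pv_aEq, pv_bEq]
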